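-- pv_equiv track=rewrite | github.com/Dan-Dan-Danyboy/Simple_engine | engine.py | possible_square_moves
-- ===== SOURCE A (Python) =====
-- def possible_square_moves(circles,squares):
--     future = []
--     for sheep in squares:
--         future_posibility = sheep[0]+str(int(sheep[1])+1)
--         if not future_posibility in circles:
--             future_positions = [future_posibility if x == sheep else x for x in squares]
--             future.append(future_positions)
--             if sheep[1] == '1':
--                 future_posibility = sheep[0]+str(int(sheep[1])+2)
--                 if not future_posibility in circles:
--                     future_positions = [future_posibility if x == sheep else x for x in squares]
--                     future.append(future_positions)
--     return future
-- ===== SOURCE B (Python) =====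
-- def possible_square_moves(circles, squares):
--     def advance(sheep):
--         col, row = sheep[0], int(sheep[1])
--         candidates = [col + str(row + 1)] + ([col + str(row + 2)] if sheep[1] == '1' else [])
--         reachable = []
--         for t in candidates:
--             if t in circles:
--                 break
--             reachable.append(t)
--         return [[t if x == sheep else x for x in squares] for t in reachable]
--
--     def go(rest):
--         return advance(rest[0]) + go(rest[1:]) if rest else []
--
--     return go(squares)
-- ===== Notes on version B (the rewrite author's own statement) =====
-- stated objective: alternative
-- what changed: A's accumulator loop with two duplicated nested append blocks becomes structural recursion over the squares list, where each sheep's boards are produced by taking the unblocked (takewhile) prefix of a closed-form candidate-target list and mapping it to boards, the per-sheep results being concatenated recursively.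
import Mathlib
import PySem

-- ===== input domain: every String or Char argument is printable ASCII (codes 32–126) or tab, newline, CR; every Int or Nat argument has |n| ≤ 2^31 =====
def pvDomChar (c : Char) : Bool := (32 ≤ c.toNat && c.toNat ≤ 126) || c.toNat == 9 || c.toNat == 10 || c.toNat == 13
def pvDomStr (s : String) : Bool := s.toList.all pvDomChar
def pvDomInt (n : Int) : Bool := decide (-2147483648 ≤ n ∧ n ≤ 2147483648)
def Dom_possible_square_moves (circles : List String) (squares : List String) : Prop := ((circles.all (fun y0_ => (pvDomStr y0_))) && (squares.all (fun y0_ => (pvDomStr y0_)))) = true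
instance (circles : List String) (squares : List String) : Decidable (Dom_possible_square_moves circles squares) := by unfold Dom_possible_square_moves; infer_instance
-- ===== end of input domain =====

-- B replaces A's accumulator loop with duplicated nested append blocks by structural
-- recursion over the squares: per sheep, the takewhile-unblocked prefix of a closed-form
-- candidate list is mapped to boards and the blocks concatenated; objective: alternative.


-- ===== PORT A =====
-- sheep[0] + str(int(sheep[1]) + d); none = IndexError/ValueError (excluded by Pre_)
def pvStep (sheep : String) (d : Int) : Option String :=
  match PySem.Str.pyGet? sheep 0, PySem.Str.pyGet? sheep 1 with
  | some c0, some c1 =>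
    match PySem.Int.ofStr? (String.mk [c1]) with
    | some n => some (String.mk ([c0] ++ (PySem.Int.toStr (n + d)).toList))
    | none => none
  | _, _ => none

def possible_square_moves (circles : List String) (squares : List String) : List (List String) :=
  squares.foldl (fun future sheep =>
    match pvStep sheep 1 with
    | none => future
    | some fp =>
      if !(circles.contains fp) then
        let future1 := future ++ [squares.map (fun x => if x == sheep then fp else x)]
        if PySem.Str.pyGet? sheep 1 == some '1' then
          match pvStep sheep 2 with
          | none => future1
          | some fp2 =>
            if !(circles.contains fp2) then
              future1 ++ [squares.map (fun x => if x == sheep then fp2 else x)]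
            else future1
        else future1
      else future) []

-- ===== PORT B =====
-- advance(sheep): closed-form candidate targets, takewhile-unblocked prefix, map to boards
def pvAdvance (circles : List String) (squares : List String) (sheep : String) : List (List String) :=
  match PySem.Str.pyGet? sheep 0, PySem.Str.pyGet? sheep 1 with
  | some col, some c1 =>
    match PySem.Int.ofStr? (String.mk [c1]) with
    | some row =>
      let candidates :=
        [String.mk ([col] ++ (PySem.Int.toStr (row + 1)).toList)] ++
          (if c1 == '1' then [String.mk ([col] ++ (PySem.Int.toStr (row + 2)).toList)] else [])
      let reachable := candidates.takeWhile (fun t => !(circles.contains t))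
      reachable.map (fun t => squares.map (fun x => if x == sheep then t else x))
    | none => []
  | _, _ => []

-- go(rest): structural recursion concatenating each sheep's block
def pvGo (circles : List String) (squares : List String) : List String → List (List String)
  | [] => []
  | sheep :: rest => pvAdvance circles squares sheep ++ pvGo circles squares rest

def possible_square_moves_alt (circles : List String) (squares : List String) : List (List String) :=
  pvGo circles squares squares

-- ===== PRECONDITION & SPEC =====
-- Pre_ excludes exactly the inputs where Python A raises: a square shorter than 2 chars
-- (IndexError) or whose second char is not an ASCII digit (ValueError from int()).
def Pre_possible_square_moves (circles : List String) (squares : List String) : Prop :=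
  ∀ s ∈ squares, 2 ≤ s.toList.length ∧ (s.toList.getD 1 ' ').isDigit = true
instance (circles : List String) (squares : List String) : Decidable (Pre_possible_square_moves circles squares) := by unfold Pre_possible_square_moves; infer_instance
def pvWitness_possible_square_moves : List String × List String := (["a3"], ["a2", "b1"])

def Spec_possible_square_moves (circles : List String) (squares : List String) (out : List (List String)) : Prop := out = possible_square_moves_alt circles squares
instance (circles : List String) (squares : List String) (out : List (List String)) : Decidable (Spec_possible_square_moves circles squares out) := by unfold Spec_possible_square_moves; infer_instance

-- ===== CLAIM (what is proved, stated in full; the proofs are below) =====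
def Claim_equal_possible_square_moves : Prop := ∀ (circles : List String) (squares : List String), Dom_possible_square_moves circles squares → Pre_possible_square_moves circles squares → Spec_possible_square_moves circles squares (possible_square_moves circles squares)

-- ===== LEMMAS AND PROOFS =====
-- A's loop body appends, for each sheep, exactly B's per-sheep block pvAdvance.
theorem pvBody_eq (circles squares : List String) (future : List (List String)) (sheep : String) :
    (match pvStep sheep 1 with
      | none => future
      | some fp =>
        if !(circles.contains fp) then
          let future1 := future ++ [squares.map (fun x => if x == sheep then fp else x)]
          if PySem.Str.pyGet? sheep 1 == some '1' then
            match pvStep sheep 2 with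
            | none => future1
            | some fp2 =>
              if !(circles.contains fp2) then
                future1 ++ [squares.map (fun x => if x == sheep then fp2 else x)]
              else future1
          else future1
        else future)
    = future ++ pvAdvance circles squares sheep := by
  unfold pvAdvance pvStep
  cases h0 : PySem.Str.pyGet? sheep 0 with
  | none => simp
  | some c0 =>
    cases h1 : PySem.Str.pyGet? sheep 1 with
    | none => simp
    | some c1 =>
      cases hr : PySem.Int.ofStr? (String.mk [c1]) with
      | none => simp [hr]
      | some row =>
        by_cases hc1 : (String.mk (c0 :: PySem.Int.toChars (row + 1))) ∈ circles
        · simp [hr, hc1]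
        · by_cases hone : c1 = '1'
          · subst hone
            by_cases hc2 : (String.mk (c0 :: PySem.Int.toChars (row + 2))) ∈ circles
            · simp [hr, hc1, hc2, List.takeWhile]
            · simp [hr, hc1, hc2, List.takeWhile]
          · simp [hr, hc1, hone, List.takeWhile]

-- the fold of 'append each sheep's block' from any prefix is that prefix ++ pvGo
theorem pvFold_eq (circles squares : List String) :
    ∀ (l : List String) (acc : List (List String)),
      l.foldl (fun future sheep => future ++ pvAdvance circles squares sheep) acc
        = acc ++ pvGo circles squares l := by
  intro l
  induction l with
  | nil => intro acc; simp [pvGo]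
  | cons sheep rest ih =>
    intro acc
    simp only [List.foldl, pvGo, ih, List.append_assoc]

-- ===== VERDICT (by name: the statement is the Claim_ definition above) =====
theorem possible_square_moves_spec : Claim_equal_possible_square_moves := by
  intro circles squares _ _
  unfold Spec_possible_square_moves possible_square_moves possible_square_moves_alt
  have hbody :
      (fun (future : List (List String)) (sheep : String) =>
        (match pvStep sheep 1 with
          | none => future
          | some fp =>
            if !(circles.contains fp) then
              let future1 := future ++ [squares.map (fun x => if x == sheep then fp else x)]
              if PySem.Str.pyGet? sheep 1 == some '1' then
                match pvStep sheep 2 with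
                | none => future1
                | some fp2 =>
                  if !(circles.contains fp2) then
                    future1 ++ [squares.map (fun x => if x == sheep then fp2 else x)]
                  else future1
              else future1
            else future))
      = (fun (future : List (List String)) (sheep : String) =>
          future ++ pvAdvance circles squares sheep) := by
    funext future sheep
    exact pvBody_eq circles squares future sheep
  rw [hbody, pvFold_eq]
  simp
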